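-- pv_equiv track=rewrite | github.com/pixeli99/wuying_agent | python/gui_owl_pipeline/enhanced_guidance.py | _rule_based_success_criteria
-- ===== SOURCE A (Python) =====
-- from typing import List, Dict, Any, Optional, Tuple
--
-- def _rule_based_success_criteria(
--                                 query_text: str,
--                                 key_steps: List[Dict[str, Any]]) -> List[str]:
--     """Generate rule-based success criteria."""
--
--     criteria = []
--     query_lower = query_text.lower()
--
--     # Task-specific criteria
--     if "login" in query_lower:
--         criteria.extend([
--             "User dashboard or home screen is displayed",
--             "Login form is no longer visible",
--             "User profile or account info is accessible"
--         ])
--     elif "search" in query_lower: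
--         criteria.extend([
--             "Search results are displayed",
--             "Results match the search query",
--             "Results count or pagination is visible"
--         ])
--     elif "create" in query_lower or "add" in query_lower:
--         criteria.extend([
--             "New item appears in list or view",
--             "Success message or confirmation is shown",
--             "Form is cleared or reset"
--         ])
--     elif "delete" in query_lower or "remove" in query_lower:
--         criteria.extend([
--             "Item no longer appears in list",
--             "Deletion confirmation is shown",
--             "Count or total is updated"
--         ])
--     elif "navigate" in query_lower or "go to" in query_lower:
--         criteria.extend([
--             "Target page or screen is loaded",
--             "URL or title matches destination",
--             "Expected content is visible"
--         ])
--
--     # Add key step completion criteria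
--     for step in key_steps[:2]:
--         criteria.append(f"{step['success_indicator']}")
--
--     # Generic criteria if needed
--     if len(criteria) < 3:
--         criteria.extend([
--             "All required actions completed without errors",
--             "Final UI state matches expected outcome",
--             "No error messages or warnings displayed"
--         ])
--
--     return criteria[:5]
-- ===== SOURCE B (Python) =====
-- _CRITERIA_TABLE = [
--     (("login",), [
--         "User dashboard or home screen is displayed",
--         "Login form is no longer visible",
--         "User profile or account info is accessible",
--     ]),
--     (("search",), [
--         "Search results are displayed",
--         "Results match the search query",
--         "Results count or pagination is visible",
--     ]),
--     (("create", "add"), [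
--         "New item appears in list or view",
--         "Success message or confirmation is shown",
--         "Form is cleared or reset",
--     ]),
--     (("delete", "remove"), [
--         "Item no longer appears in list",
--         "Deletion confirmation is shown",
--         "Count or total is updated",
--     ]),
--     (("navigate", "go to"), [
--         "Target page or screen is loaded",
--         "URL or title matches destination",
--         "Expected content is visible",
--     ]),
-- ]
--
-- _GENERIC = [
--     "All required actions completed without errors",
--     "Final UI state matches expected outcome",
--     "No error messages or warnings displayed",
-- ]
--
--
-- def _first_match(query_lower, table):
--     """First criteria list whose keyword group hits query_lower (recursive scan)."""
--     if not table:
--         return None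
--     keywords, crits = table[0]
--     if any(k in query_lower for k in keywords):
--         return crits
--     return _first_match(query_lower, table[1:])
--
--
-- def _rule_based_success_criteria(query_text, key_steps):
--     indicators = [step["success_indicator"] for step in key_steps[:2]]
--     base = _first_match(query_text.lower(), _CRITERIA_TABLE)
--     if base is None:
--         # 0-2 indicators only, so the generic criteria always kick in;
--         # the cap at 5 reduces to slicing the generic tail.
--         return indicators + _GENERIC[:5 - len(indicators)]
--     # base has exactly 3 entries and indicators has at most 2, so the
--     # total is 3..5: neither padding nor truncation can apply.
--     return base + indicators
-- ===== Notes on version B (the rewrite author's own statement) =====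
-- stated objective: alternative
-- what changed: Replaces A's accumulate-pad-truncate pipeline by a closed-form assembly: a recursive first-match over a keyword table, then, using the invariants |base|=3 and |indicators|<=2, returns base+indicators directly in the matched case and indicators+_GENERIC[:5-len] in the unmatched case, eliminating the len<3 padding check and the final [:5] truncation.
import Mathlib
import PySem

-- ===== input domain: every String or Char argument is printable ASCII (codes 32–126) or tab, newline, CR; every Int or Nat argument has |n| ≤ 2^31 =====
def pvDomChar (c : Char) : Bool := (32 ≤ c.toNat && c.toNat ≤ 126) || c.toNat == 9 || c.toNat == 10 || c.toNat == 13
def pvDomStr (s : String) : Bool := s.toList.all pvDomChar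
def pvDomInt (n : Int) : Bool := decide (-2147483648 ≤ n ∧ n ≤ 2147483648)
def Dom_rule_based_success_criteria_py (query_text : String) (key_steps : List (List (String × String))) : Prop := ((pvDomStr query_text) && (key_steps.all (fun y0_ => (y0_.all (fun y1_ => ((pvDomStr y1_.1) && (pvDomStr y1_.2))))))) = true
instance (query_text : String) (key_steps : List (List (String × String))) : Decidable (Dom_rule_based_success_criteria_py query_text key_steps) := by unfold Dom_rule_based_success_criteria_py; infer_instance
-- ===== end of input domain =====

-- B assembles the result in closed form from the length invariants (|base| = 3, |indicators| ≤ 2)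
-- instead of A's accumulate / pad-if-short / truncate pipeline; same return value on Pre_.

-- ===== PORT A =====
def rule_based_success_criteria_py (query_text : String) (key_steps : List (List (String × String))) : List String :=
  let query_lower := PySem.Str.lower query_text
  let criteria : List String :=
    if PySem.Str.isIn "login" query_lower then
      ["User dashboard or home screen is displayed",
       "Login form is no longer visible",
       "User profile or account info is accessible"]
    else if PySem.Str.isIn "search" query_lower then
      ["Search results are displayed",
       "Results match the search query",
       "Results count or pagination is visible"]
    else if PySem.Str.isIn "create" query_lower || PySem.Str.isIn "add" query_lower then
      ["New item appears in list or view",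
       "Success message or confirmation is shown",
       "Form is cleared or reset"]
    else if PySem.Str.isIn "delete" query_lower || PySem.Str.isIn "remove" query_lower then
      ["Item no longer appears in list",
       "Deletion confirmation is shown",
       "Count or total is updated"]
    else if PySem.Str.isIn "navigate" query_lower || PySem.Str.isIn "go to" query_lower then
      ["Target page or screen is loaded",
       "URL or title matches destination",
       "Expected content is visible"]
    else []
  -- step['success_indicator'] (KeyError where missing is excluded by Pre_; total form via getD)
  let criteria := (PySem.List.slice key_steps none (some 2)).foldl
      (fun acc step => acc ++ [(step.lookup "success_indicator").getD ""]) criteria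
  let criteria :=
    if criteria.length < 3 then
      criteria ++
        ["All required actions completed without errors",
         "Final UI state matches expected outcome",
         "No error messages or warnings displayed"]
    else criteria
  PySem.List.slice criteria none (some 5)

-- ===== PORT B =====
def pvCriteriaTable : List (List String × List String) :=
  [(["login"],
    ["User dashboard or home screen is displayed",
     "Login form is no longer visible",
     "User profile or account info is accessible"]),
   (["search"],
    ["Search results are displayed",
     "Results match the search query",
     "Results count or pagination is visible"]),
   (["create", "add"],
    ["New item appears in list or view",
     "Success message or confirmation is shown",
     "Form is cleared or reset"]),
   (["delete", "remove"],
    ["Item no longer appears in list",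
     "Deletion confirmation is shown",
     "Count or total is updated"]),
   (["navigate", "go to"],
    ["Target page or screen is loaded",
     "URL or title matches destination",
     "Expected content is visible"])]

def pvGeneric : List String :=
  ["All required actions completed without errors",
   "Final UI state matches expected outcome",
   "No error messages or warnings displayed"]

-- recursive first-match scan (_first_match in Source B)
def pvFirstMatch (query_lower : String) : List (List String × List String) → Option (List String)
  | [] => none
  | e :: rest =>
    if e.1.any (fun k => PySem.Str.isIn k query_lower) then some e.2
    else pvFirstMatch query_lower rest

def rule_based_success_criteria_py_alt (query_text : String) (key_steps : List (List (String × String))) : List String :=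
  let indicators := (PySem.List.slice key_steps none (some 2)).map
      (fun step => (step.lookup "success_indicator").getD "")
  match pvFirstMatch (PySem.Str.lower query_text) pvCriteriaTable with
  | none => indicators ++ pvGeneric.take (5 - indicators.length)
  | some base => base ++ indicators

-- ===== PRECONDITION & SPEC =====
-- Pre_ excludes exactly the inputs where A raises KeyError: one of the first two key_steps
-- lacks the key 'success_indicator' (B raises there too).
def Pre_rule_based_success_criteria_py (query_text : String) (key_steps : List (List (String × String))) : Prop :=
  ∀ step ∈ key_steps.take 2, (step.lookup "success_indicator").isSome = true
instance (query_text : String) (key_steps : List (List (String × String))) : Decidable (Pre_rule_based_success_criteria_py query_text key_steps) := by unfold Pre_rule_based_success_criteria_py; infer_instance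

def pvWitness_rule_based_success_criteria_py : String × (List (List (String × String))) :=
  ("please login", [[("success_indicator", "dashboard shown")]])

def Spec_rule_based_success_criteria_py (query_text : String) (key_steps : List (List (String × String))) (out : List String) : Prop := out = rule_based_success_criteria_py_alt query_text key_steps
instance (query_text : String) (key_steps : List (List (String × String))) (out : List String) : Decidable (Spec_rule_based_success_criteria_py query_text key_steps out) := by unfold Spec_rule_based_success_criteria_py; infer_instance

-- ===== CLAIM =====
def Claim_equal_rule_based_success_criteria_py : Prop := ∀ (query_text : String) (key_steps : List (List (String × String))), Dom_rule_based_success_criteria_py query_text key_steps → Pre_rule_based_success_criteria_py query_text key_steps → Spec_rule_based_success_criteria_py query_text key_steps (rule_based_success_criteria_py query_text key_steps)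

-- ===== LEMMAS AND PROOFS =====

-- matched case: |base| = 3, |inds| ≤ 2 ⇒ no padding, no truncation
theorem pvAssemble_matched (base inds g : List String)
    (hb : base.length = 3) (hi : inds.length ≤ 2) :
    ((if (base ++ inds).length < 3 then (base ++ inds) ++ g else base ++ inds).take 5)
      = base ++ inds := by
  rw [if_neg (by simp [hb]), List.take_of_length_le (by simp [hb]; omega)]

-- unmatched case: |inds| ≤ 2 ⇒ padding always applies, truncation hits only the pad
theorem pvAssemble_unmatched (inds g : List String) (hi : inds.length ≤ 2) :
    ((if inds.length < 3 then inds ++ g else inds).take 5)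
      = inds ++ g.take (5 - inds.length) := by
  rw [if_pos (by omega), List.take_append, List.take_of_length_le (by omega)]

-- ===== VERDICT =====
theorem rule_based_success_criteria_py_spec : Claim_equal_rule_based_success_criteria_py := by
  intro q ks _ _
  unfold Spec_rule_based_success_criteria_py
  simp only [rule_based_success_criteria_py, rule_based_success_criteria_py_alt,
    PySem.List.foldl_append_singleton_eq_map]
  rw [show ((5:Int)) = ((5:Nat):Int) from rfl, show ((2:Int)) = ((2:Nat):Int) from rfl,
    PySem.List.slice_to_natCast, PySem.List.slice_to_natCast]
  set inds := (ks.take 2).map (fun step => ((step.lookup "success_indicator").getD "")) with hinds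
  have hi : inds.length ≤ 2 := by
    simp [hinds, List.length_map, List.length_take]
  simp only [pvFirstMatch, pvCriteriaTable, pvGeneric, List.any_cons, List.any_nil,
    Bool.or_false]
  cases h1 : PySem.Str.isIn "login" (PySem.Str.lower q) <;>
    cases h2 : PySem.Str.isIn "search" (PySem.Str.lower q) <;>
      cases h3 : PySem.Str.isIn "create" (PySem.Str.lower q) <;>
        cases h4 : PySem.Str.isIn "add" (PySem.Str.lower q) <;>
          cases h5 : PySem.Str.isIn "delete" (PySem.Str.lower q) <;>
            cases h6 : PySem.Str.isIn "remove" (PySem.Str.lower q) <;>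
              cases h7 : PySem.Str.isIn "navigate" (PySem.Str.lower q) <;>
                cases h8 : PySem.Str.isIn "go to" (PySem.Str.lower q) <;>
                  simp only [Bool.false_or, Bool.true_or, if_true, Bool.or_self] <;>
                  first
                    | exact pvAssemble_matched _ inds _ rfl hi
                    | exact pvAssemble_unmatched inds _ hi
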